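-- pv_equiv track=rewrite | github.com/cje00/DLabP | 3-2-7.py | solution
-- ===== SOURCE A (Python) =====
-- def solution(num_apple, num_carrot, k):
--     answer = 0
--
--     if num_apple < num_carrot * 3:
--         answer = num_apple // 3
--     else:
--         answer = num_carrot
--
--     num_apple -= answer * 3
--     num_carrot -= answer
--
--     i = 0
--
--     k = k-(num_apple + num_carrot)  # add
--
--     while k> 0 :  #  before adj -> while k - (num_apple + num_carrot + i) > 0:
--         if i % 4 == 0:
--             answer = answer -1 # before adj -> answer += 1
--         i = i + 1
--         k = k-1  # add
--
--     return answer
-- ===== SOURCE B (Python) =====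
-- def solution(num_apple, num_carrot, k):
--     # Closed form: the loop decrements once for each i in [0, rem) with i % 4 == 0,
--     # i.e. ceil(rem/4) = (rem + 3) // 4 times, where rem = k minus leftover produce.
--     if num_apple < num_carrot * 3:
--         base = num_apple // 3
--     else:
--         base = num_carrot
--     rem = k - (num_apple - base * 3) - (num_carrot - base)
--     if rem > 0:
--         return base - (rem + 3) // 4
--     return base
-- ===== Notes on version B (the rewrite author's own statement) =====
-- stated objective: faster
-- what changed: Replaces the k-step while loop that decrements the answer on every 4th iteration with a closed-form ceiling division (rem+3)//4.
import Mathlib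
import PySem

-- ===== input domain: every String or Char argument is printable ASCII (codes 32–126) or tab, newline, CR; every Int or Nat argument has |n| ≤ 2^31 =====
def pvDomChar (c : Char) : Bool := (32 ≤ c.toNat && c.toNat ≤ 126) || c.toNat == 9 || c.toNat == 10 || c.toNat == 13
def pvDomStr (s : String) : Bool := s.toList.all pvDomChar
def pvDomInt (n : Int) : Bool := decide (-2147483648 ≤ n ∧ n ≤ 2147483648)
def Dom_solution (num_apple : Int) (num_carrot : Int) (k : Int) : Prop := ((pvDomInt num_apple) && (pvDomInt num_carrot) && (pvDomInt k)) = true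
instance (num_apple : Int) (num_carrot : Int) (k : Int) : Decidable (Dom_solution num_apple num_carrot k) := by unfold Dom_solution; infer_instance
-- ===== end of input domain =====

-- B replaces A's O(k) while loop (decrement answer every 4th iteration) with the
-- closed-form ceiling division (rem+3)//4; objective: faster (asymptotic).

-- ===== PORT A =====
-- the while loop: while k > 0: if i % 4 == 0: answer -= 1; i += 1; k -= 1
def solutionLoop (answer : Int) (i : Int) (k : Int) : Int :=
  if 0 < k then
    solutionLoop (if PySem.Int.mod i 4 = 0 then answer - 1 else answer) (i + 1) (k - 1)
  else answer
termination_by k.toNat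
decreasing_by omega

def solution (num_apple : Int) (num_carrot : Int) (k : Int) : Int :=
  let answer := if num_apple < num_carrot * 3 then PySem.Int.floordiv num_apple 3 else num_carrot
  let num_apple := num_apple - answer * 3
  let num_carrot := num_carrot - answer
  solutionLoop answer 0 (k - (num_apple + num_carrot))

-- ===== PORT B =====
def solution_alt (num_apple : Int) (num_carrot : Int) (k : Int) : Int :=
  let base := if num_apple < num_carrot * 3 then PySem.Int.floordiv num_apple 3 else num_carrot
  let rem := k - (num_apple - base * 3) - (num_carrot - base)
  if 0 < rem then base - PySem.Int.floordiv (rem + 3) 4 else base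

-- ===== PRECONDITION & SPEC =====
def Spec_solution (num_apple : Int) (num_carrot : Int) (k : Int) (out : Int) : Prop := out = solution_alt num_apple num_carrot k
instance (num_apple : Int) (num_carrot : Int) (k : Int) (out : Int) : Decidable (Spec_solution num_apple num_carrot k out) := by unfold Spec_solution; infer_instance

-- ===== CLAIM (what is proved, stated in full; the proofs are below) =====
def Claim_equal_solution : Prop := ∀ (num_apple : Int) (num_carrot : Int) (k : Int), Dom_solution num_apple num_carrot k → Spec_solution num_apple num_carrot k (solution num_apple num_carrot k)

-- ===== LEMMAS AND PROOFS =====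

-- closed form of the loop: it subtracts the number of multiples of 4 in [i, i+k)
lemma solutionLoop_closed : ∀ (n : Nat) (a i k : Int), k ≤ (n : Int) →
    solutionLoop a i k = if 0 < k then a - ((i + k + 3) / 4 - (i + 3) / 4) else a := by
  intro n
  induction n with
  | zero =>
    intro a i k hk
    rw [solutionLoop, if_neg (by omega), if_neg (by omega)]
  | succ n ih =>
    intro a i k hk
    rw [solutionLoop]
    by_cases h : 0 < k
    · rw [if_pos h, ih _ _ _ (by push_cast at hk ⊢; omega), if_pos h,
        PySem.Int.mod_eq_emod_of_pos (by omega)]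
      split_ifs <;> omega
    · rw [if_neg h, if_neg h]

-- ===== VERDICT (by name: the statement is the Claim_ definition above) =====
theorem solution_spec : Claim_equal_solution := by
  intro na nc k _
  unfold Spec_solution
  simp only [solution, solution_alt]
  set a := if na < nc * 3 then PySem.Int.floordiv na 3 else nc with ha
  set rem := k - (na - a * 3) - (nc - a) with hrem
  have hL : k - (na - a * 3 + (nc - a)) = rem := by omega
  rw [hL, solutionLoop_closed rem.toNat a 0 rem (by omega)]
  by_cases h : 0 < rem
  · rw [if_pos h, if_pos h, PySem.Int.floordiv_eq_ediv_of_pos (by omega)]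
    omega
  · rw [if_neg h, if_neg h]
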